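-- pv_equiv track=rewrite | github.com/raagadhvani/raagadhavani2024 | raagadhvani2.0-main/pages/classifynew.py | classify_raga_by_occurrence
-- ===== SOURCE A (Python) =====
-- def classify_raga_by_occurrence(note_array):
--     note_counts = {}
--
--     for note in note_array:
--         note_name = note[:-2]  # Extract the note name without the octave
--         note_counts[note_name] = note_counts.get(note_name, 0) + 1
--
--     sorted_notes = sorted(note_counts.items(), key=lambda x: x[1], reverse=True)
--
--     shankarabharanam_notes = {'R2', 'G3', 'M1', 'D2', 'N3'}
--     bhavapriya_notes = {'R1', 'G2', 'M2', 'D1', 'N2'}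
--
--     shankarabharanam_count = sum(count for note, count in sorted_notes if note in shankarabharanam_notes)
--     bhavapriya_count = sum(count for note, count in sorted_notes if note in bhavapriya_notes)
--
--     if shankarabharanam_count > bhavapriya_count:
--         return "Shankarabharanam"
--     elif bhavapriya_count > shankarabharanam_count:
--         return "Bhavapriya"
--     else:
--         return "Unknown Raga"
-- ===== SOURCE B (Python) =====
-- def classify_raga_by_occurrence(note_array):
--     shankarabharanam_notes = {'R2', 'G3', 'M1', 'D2', 'N3'}
--     bhavapriya_notes = {'R1', 'G2', 'M2', 'D1', 'N2'}
--     shankarabharanam_count = 0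
--     bhavapriya_count = 0
--     for note in note_array:
--         name = note[:-2]
--         if name in shankarabharanam_notes:
--             shankarabharanam_count += 1
--         if name in bhavapriya_notes:
--             bhavapriya_count += 1
--     if shankarabharanam_count > bhavapriya_count:
--         return "Shankarabharanam"
--     elif bhavapriya_count > shankarabharanam_count:
--         return "Bhavapriya"
--     else:
--         return "Unknown Raga"
-- ===== Notes on version B (the rewrite author's own statement) =====
-- stated objective: simpler
-- what changed: Single pass with two integer accumulators over note names, removing the intermediate count dictionary, the sort by count, and the two separate summing passes.
import Mathlib
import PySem

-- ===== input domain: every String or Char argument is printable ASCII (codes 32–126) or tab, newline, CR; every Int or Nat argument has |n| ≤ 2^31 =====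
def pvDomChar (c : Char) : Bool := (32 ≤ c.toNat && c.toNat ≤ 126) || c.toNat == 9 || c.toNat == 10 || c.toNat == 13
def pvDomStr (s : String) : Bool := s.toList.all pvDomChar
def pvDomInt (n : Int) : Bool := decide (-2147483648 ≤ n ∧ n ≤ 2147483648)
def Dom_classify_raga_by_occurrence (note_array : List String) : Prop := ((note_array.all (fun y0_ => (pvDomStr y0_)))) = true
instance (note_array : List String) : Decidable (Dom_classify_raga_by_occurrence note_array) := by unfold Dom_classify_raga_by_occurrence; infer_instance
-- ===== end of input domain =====

-- B replaces A's count-dictionary + sort-by-count + two summing passes with a single pass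
-- keeping two integer accumulators (objective: simpler).


-- ===== PORT A =====
def classify_raga_by_occurrence (note_array : List String) : String :=
  let note_counts : PySem.Dict String Int :=
    note_array.foldl (fun d note =>
      let note_name := PySem.Str.slice note none (some (-2))
      d.insert note_name (d.getD note_name 0 + 1)) PySem.Dict.empty
  let sorted_notes := PySem.List.sorted note_counts.items (fun x => x.2) true
  let shankarabharanam_notes := PySem.Set.ofList ["R2", "G3", "M1", "D2", "N3"]
  let bhavapriya_notes := PySem.Set.ofList ["R1", "G2", "M2", "D1", "N2"]
  let shankarabharanam_count : Int :=
    ((sorted_notes.filter (fun p => decide (p.1 ∈ shankarabharanam_notes))).map (·.2)).sum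
  let bhavapriya_count : Int :=
    ((sorted_notes.filter (fun p => decide (p.1 ∈ bhavapriya_notes))).map (·.2)).sum
  if shankarabharanam_count > bhavapriya_count then "Shankarabharanam"
  else if bhavapriya_count > shankarabharanam_count then "Bhavapriya"
  else "Unknown Raga"

-- ===== PORT B =====
def classify_raga_by_occurrence_alt (note_array : List String) : String :=
  let shankarabharanam_notes := PySem.Set.ofList ["R2", "G3", "M1", "D2", "N3"]
  let bhavapriya_notes := PySem.Set.ofList ["R1", "G2", "M2", "D1", "N2"]
  let counts : Int × Int :=
    note_array.foldl (fun acc note =>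
      let name := PySem.Str.slice note none (some (-2))
      ((if name ∈ shankarabharanam_notes then acc.1 + 1 else acc.1),
       (if name ∈ bhavapriya_notes then acc.2 + 1 else acc.2))) (0, 0)
  if counts.1 > counts.2 then "Shankarabharanam"
  else if counts.2 > counts.1 then "Bhavapriya"
  else "Unknown Raga"

-- ===== PRECONDITION & SPEC =====
def Spec_classify_raga_by_occurrence (note_array : List String) (out : String) : Prop := out = classify_raga_by_occurrence_alt note_array
instance (note_array : List String) (out : String) : Decidable (Spec_classify_raga_by_occurrence note_array out) := by unfold Spec_classify_raga_by_occurrence; infer_instance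

-- ===== CLAIM (what is proved, stated in full; the proofs are below) =====
def Claim_equal_classify_raga_by_occurrence : Prop := ∀ (note_array : List String), Dom_classify_raga_by_occurrence note_array → Spec_classify_raga_by_occurrence note_array (classify_raga_by_occurrence note_array)

-- ===== LEMMAS AND PROOFS =====

-- B's paired fold counts the notes whose name satisfies each membership test.
theorem pv_pair_fold (ns : List String) (p q : String → Bool) (a b : Int) :
    ns.foldl (fun acc x => ((if p x then acc.1 + 1 else acc.1),
                            (if q x then acc.2 + 1 else acc.2))) (a, b)
      = (a + ns.countP p, b + ns.countP q) := by
  induction ns generalizing a b with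
  | nil => simp
  | cons x t ih =>
      simp only [List.foldl_cons, ih, List.countP_cons]
      by_cases hp : p x <;> by_cases hq : q x <;>
        simp [hp, hq, Prod.ext_iff] <;> (try constructor) <;> ring

-- A's dict-items sum over keys in a set equals the count of list elements in the set.
theorem pv_sum_counter (ns : List String) (S : List String) :
    ((((PySem.List.sorted (PySem.Dict.counter ns).items (fun x => x.2) true).filter
        (fun p => decide (p.1 ∈ S))).map (·.2)).sum : Int)
      = (ns.countP (fun x => decide (x ∈ S)) : Int) := by
  have hperm : (PySem.List.sorted (PySem.Dict.counter ns).items (fun x => x.2) true).Perm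
      (PySem.Dict.counter ns).items := PySem.List.sorted_perm _ _ _
  rw [((hperm.filter _).map _).sum_eq]
  rw [PySem.Dict.items_counter]
  have hperm2 : (PySem.Set.ofList ns).Perm ns.dedup := by
    apply (List.perm_ext_iff_of_nodup (PySem.Set.nodup_ofList ns) ns.nodup_dedup).mpr
    intro x; simp [PySem.Set.mem_ofList, List.mem_dedup]
  have h3 := ((hperm2.filter (fun k => decide (k ∈ S))).map
      (fun k => ((ns.count k : Nat) : Int))).sum_eq
  have hfm : ∀ (l : List String),
      ((l.map (fun k => (k, (ns.count k : Int)))).filter (fun p => decide (p.1 ∈ S))).map (·.2)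
        = (l.filter (fun k => decide (k ∈ S))).map (fun k => ((ns.count k : Nat) : Int)) := by
    intro l; induction l with
    | nil => rfl
    | cons y t ih => by_cases h : y ∈ S <;> simp [h, ih]
  rw [hfm, h3]
  rw [← List.sum_map_count_dedup_filter_eq_countP (fun x => decide (x ∈ S)) ns]
  rw [Nat.cast_list_sum, List.map_map]
  rfl

-- ===== VERDICT (by name: the statement is the Claim_ definition above) =====
theorem classify_raga_by_occurrence_spec : Claim_equal_classify_raga_by_occurrence := by
  intro note_array _
  unfold Spec_classify_raga_by_occurrence classify_raga_by_occurrence classify_raga_by_occurrence_alt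
  have hA : note_array.foldl (fun d note =>
      let note_name := PySem.Str.slice note none (some (-2))
      d.insert note_name (d.getD note_name 0 + 1)) PySem.Dict.empty
      = PySem.Dict.counter (note_array.map (fun note => PySem.Str.slice note none (some (-2)))) := by
    rw [← PySem.Dict.foldl_insert_getD_add_one_eq_counter, List.foldl_map]
  have hB : note_array.foldl (fun (acc : Int × Int) note =>
      let name := PySem.Str.slice note none (some (-2))
      ((if name ∈ PySem.Set.ofList ["R2", "G3", "M1", "D2", "N3"] then acc.1 + 1 else acc.1),
       (if name ∈ PySem.Set.ofList ["R1", "G2", "M2", "D1", "N2"] then acc.2 + 1 else acc.2))) (0, 0)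
      = ((note_array.map (fun note => PySem.Str.slice note none (some (-2)))).foldl
          (fun (acc : Int × Int) x =>
            ((if decide (x ∈ PySem.Set.ofList ["R2", "G3", "M1", "D2", "N3"]) then acc.1 + 1 else acc.1),
             (if decide (x ∈ PySem.Set.ofList ["R1", "G2", "M2", "D1", "N2"]) then acc.2 + 1 else acc.2))) (0, 0)) := by
    rw [List.foldl_map]; simp
  simp only [hA, hB, pv_pair_fold, pv_sum_counter]
  simp
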